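-- pv_equiv track=rewrite | github.com/Francesco7D2/vaes-fashion-compatibility | src/data_processing/group_manipulation.py | create_combinations
-- ===== SOURCE A (Python) =====
-- def create_combinations(list_elements, root=True):
--     """
--     Generates all possible combinations of elements from a given list.
--
--     Parameters:
--     - list_elements (list): The list of elements for which combinations are generated.
--     - root (bool): If True, includes combinations with a single element.
--
--     Returns:
--     - list: List of lists containing all possible combinations.
--
--     Example:
--     create_combinations(['A', 'B', 'C'])  # Output: [['A'], ['A', 'B'], ['A', 'C'], ['B'], ['B', 'C'], ['C']]
--     """
--     combination_list = [[list_elements[0]]]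
--     for element in list_elements[1:]:
--         for combination in combination_list[:]:  # Make a copy to avoid modifying while iterating
--             combination_list.append(combination + [element])
--     if not root:
--         for element in list_elements[1:]:
--             combination_list.append([element])
--     return combination_list
-- ===== SOURCE B (Python) =====
-- def create_combinations(list_elements, root=True):
--     first = list_elements[0]
--     rest = list_elements[1:]
--     n = len(rest)
--     result = []
--     for mask in range(2 ** n):
--         combo = [first]
--         for i in range(n):
--             if (mask >> i) & 1:
--                 combo.append(rest[i])
--         result.append(combo)
--     if not root:
--         for element in rest:
--             result.append([element])
--     return result
-- ===== Notes on version B (the rewrite author's own statement) =====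
-- stated objective: alternative
-- what changed: Replaces A's in-place doubling loop (appending to the list being iterated over a copy) with direct binary-mask enumeration: each subset index 0..2^(n-1)-1 is decoded bitwise into a combination anchored on the first element.
import Mathlib
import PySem

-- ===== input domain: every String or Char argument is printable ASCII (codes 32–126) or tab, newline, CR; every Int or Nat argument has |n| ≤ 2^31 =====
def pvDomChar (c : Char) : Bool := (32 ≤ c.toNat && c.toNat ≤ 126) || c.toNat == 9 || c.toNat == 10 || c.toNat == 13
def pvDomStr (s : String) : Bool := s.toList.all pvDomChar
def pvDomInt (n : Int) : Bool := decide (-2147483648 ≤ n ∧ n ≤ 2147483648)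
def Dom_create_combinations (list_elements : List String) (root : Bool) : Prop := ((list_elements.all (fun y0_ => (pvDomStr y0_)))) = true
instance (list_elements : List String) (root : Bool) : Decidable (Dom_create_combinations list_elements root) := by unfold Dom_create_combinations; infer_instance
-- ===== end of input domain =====

-- B replaces A's in-place-doubling loop by direct binary-mask enumeration of the
-- anchored subsets (same cost; objective: alternative algorithm).

-- ===== PORT A =====
-- A: combination_list = [[first]]; for element in rest: for combination in copy: append combination+[element];
--    then if not root, append singletons of the rest.
def create_combinations (list_elements : List String) (root : Bool) : List (List String) :=
  match list_elements with
  | [] => []  -- unreachable: Pre_ excludes [], where Python A raises IndexError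
  | first :: rest =>
    let combination_list :=
      rest.foldl (fun acc element => acc ++ acc.map (fun c => c ++ [element])) [[first]]
    if root then combination_list
    else combination_list ++ rest.map (fun element => [element])

-- ===== PORT B =====
-- inner loop of Source B: for i in range(n): if (mask >> i) & 1: combo.append(rest[i])
def pvPickB (mask : Nat) (rest : List String) (start : List String) : List String :=
  (List.range rest.length).foldl
    (fun combo i => if mask.testBit i then combo ++ [rest.getD i ""] else combo) start

def create_combinations_alt (list_elements : List String) (root : Bool) : List (List String) :=
  match list_elements with
  | [] => []  -- unreachable: Pre_ excludes [], where Python B raises IndexError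
  | first :: rest =>
    let result := (List.range (2 ^ rest.length)).map (fun mask => pvPickB mask rest [first])
    if root then result
    else result ++ rest.map (fun element => [element])

-- ===== PRECONDITION & SPEC =====
-- Pre_ excludes only the empty list, on which both Pythons raise IndexError at list_elements[0].
def Pre_create_combinations (list_elements : List String) (root : Bool) : Prop :=
  list_elements ≠ []
instance (list_elements : List String) (root : Bool) : Decidable (Pre_create_combinations list_elements root) := by unfold Pre_create_combinations; infer_instance

def pvWitness_create_combinations : List String × Bool := (["A", "B"], true)

def Spec_create_combinations (list_elements : List String) (root : Bool) (out : List (List String)) : Prop := out = create_combinations_alt list_elements root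
instance (list_elements : List String) (root : Bool) (out : List (List String)) : Decidable (Spec_create_combinations list_elements root out) := by unfold Spec_create_combinations; infer_instance

-- ===== CLAIM (what is proved, stated in full; the proofs are below) =====
def Claim_equal_create_combinations : Prop := ∀ (list_elements : List String) (root : Bool), Dom_create_combinations list_elements root → Pre_create_combinations list_elements root → Spec_create_combinations list_elements root (create_combinations list_elements root)

-- ===== LEMMAS AND PROOFS =====

-- the subset selected by the low bits of `mask`, as a filter of the index range
def pvSel (mask : Nat) (rest : List String) : List String :=
  ((List.range rest.length).filter (fun i => mask.testBit i)).map (fun i => rest.getD i "")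

theorem pvPickB_eq (mask : Nat) (rest : List String) (start : List String) :
    pvPickB mask rest start = start ++ pvSel mask rest := by
  unfold pvPickB pvSel
  exact PySem.List.foldl_append_if _ _ _ _

theorem pvTestBit_lo {n m i : ℕ} (h : i < n) : (2 ^ n + m).testBit i = m.testBit i := by
  simp only [Nat.testBit_eq_decide_div_mod_eq]
  have hd : 2 ^ i ∣ 2 ^ n := pow_dvd_pow 2 h.le
  rw [Nat.add_div_of_dvd_right hd, Nat.pow_div h.le (by norm_num)]
  have hni : n - i = (n - i - 1) + 1 := by omega
  rw [hni, pow_succ, Nat.mul_comm, Nat.mul_add_mod]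

theorem pvTestBit_hi {n m : ℕ} (h : m < 2 ^ n) : (2 ^ n + m).testBit n = true := by
  simp only [Nat.testBit_eq_decide_div_mod_eq]
  rw [Nat.add_div_of_dvd_right dvd_rfl, Nat.div_self (Nat.pow_pos (by norm_num)),
    Nat.div_eq_of_lt h]
  decide

theorem pvSel_lo {m : ℕ} {rest : List String} {e : String} (h : m < 2 ^ rest.length) :
    pvSel m (rest ++ [e]) = pvSel m rest := by
  unfold pvSel
  rw [List.length_append, List.length_singleton, List.range_succ, List.filter_append,
    List.filter_singleton, Nat.testBit_eq_false_of_lt h]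
  simp only [Bool.cond_false, List.append_nil]
  apply List.map_congr_left
  intro i hi
  have hlt : i < rest.length := List.mem_range.mp (List.mem_of_mem_filter hi)
  rw [List.getD_append _ _ _ _ hlt]

theorem pvSel_hi {m : ℕ} {rest : List String} {e : String} (h : m < 2 ^ rest.length) :
    pvSel (2 ^ rest.length + m) (rest ++ [e]) = pvSel m rest ++ [e] := by
  unfold pvSel
  rw [List.length_append, List.length_singleton, List.range_succ, List.filter_append,
    List.filter_singleton, pvTestBit_hi h]
  simp only [Bool.cond_true]
  have hf : (List.range rest.length).filter (fun i => (2 ^ rest.length + m).testBit i)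
      = (List.range rest.length).filter (fun i => m.testBit i) :=
    List.filter_congr (fun i hi => by rw [pvTestBit_lo (List.mem_range.mp hi)])
  rw [hf]
  simp only [List.map_append]
  congr 1
  · apply List.map_congr_left
    intro i hi
    have hlt : i < rest.length := List.mem_range.mp (List.mem_of_mem_filter hi)
    rw [List.getD_append _ _ _ _ hlt]
  · simp [List.getD]

-- A's doubling loop equals B's mask enumeration (induction on rest from the right)
theorem pvMain (rest : List String) (first : String) :
    rest.foldl (fun acc element => acc ++ acc.map (fun c => c ++ [element])) [[first]]
      = (List.range (2 ^ rest.length)).map (fun mask => pvPickB mask rest [first]) := by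
  induction rest using List.reverseRecOn with
  | nil => simp [pvPickB]
  | append_singleton rest e ih =>
    rw [List.foldl_append, ih]
    rw [List.length_append, List.length_singleton, pow_succ, Nat.mul_two, List.range_add]
    rw [List.foldl_cons, List.foldl_nil, List.map_append, List.map_map]
    congr 1
    · apply List.map_congr_left
      intro m hm
      have hlt : m < 2 ^ rest.length := List.mem_range.mp hm
      rw [pvPickB_eq, pvPickB_eq, pvSel_lo hlt]
    · rw [List.map_map]
      apply List.map_congr_left
      intro m hm
      have hlt : m < 2 ^ rest.length := List.mem_range.mp hm
      simp only [Function.comp]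
      rw [pvPickB_eq, pvPickB_eq, pvSel_hi hlt, List.append_assoc]

-- ===== VERDICT (by name: the statement is the Claim_ definition above) =====
theorem create_combinations_spec : Claim_equal_create_combinations := by
  intro list_elements root _ hpre
  unfold Spec_create_combinations create_combinations create_combinations_alt
  match list_elements with
  | [] => exact absurd rfl hpre
  | first :: rest =>
    simp only
    rw [pvMain]
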